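-- pv_equiv track=rewrite | github.com/MrBrantCode/unitest_baseline | mut_generate/mist_train_cf/cf_3031/solution.py | create_cube_dictionary
-- ===== SOURCE A (Python) =====
-- def is_prime(num):
--     if num < 2:
--         return False
--     for i in range(2, int(num ** 0.5) + 1):
--         if num % i == 0:
--             return False
--     return True
--
-- def create_cube_dictionary(n):
--     cube_dict = {}
--     prime_count = 0
--     for num in range(n):
--         if is_prime(num):
--             cube_dict[num] = num ** 3
--             prime_count += 1
--     return cube_dict, prime_count
-- ===== SOURCE B (Python) =====
-- def create_cube_dictionary(n):
--     # Incremental sieve by stored primes: each candidate is trial-divided only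
--     # by the primes found so far, stopping once p*p exceeds the candidate.
--     primes = []
--     cube_dict = {}
--     for num in range(2, n):
--         is_p = True
--         for p in primes:
--             if p * p > num:
--                 break
--             if num % p == 0:
--                 is_p = False
--                 break
--         if is_p:
--             primes.append(num)
--             cube_dict[num] = num ** 3
--     return cube_dict, len(primes)
-- ===== Notes on version B (the rewrite author's own statement) =====
-- stated objective: faster
-- what changed: Instead of trial-dividing each candidate by every integer up to its square root, B maintains the list of primes found so far and trial-divides each candidate only by those primes up to its square root (stopping early on a sorted list), which removes the per-candidate scan over composites.
import Mathlib
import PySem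

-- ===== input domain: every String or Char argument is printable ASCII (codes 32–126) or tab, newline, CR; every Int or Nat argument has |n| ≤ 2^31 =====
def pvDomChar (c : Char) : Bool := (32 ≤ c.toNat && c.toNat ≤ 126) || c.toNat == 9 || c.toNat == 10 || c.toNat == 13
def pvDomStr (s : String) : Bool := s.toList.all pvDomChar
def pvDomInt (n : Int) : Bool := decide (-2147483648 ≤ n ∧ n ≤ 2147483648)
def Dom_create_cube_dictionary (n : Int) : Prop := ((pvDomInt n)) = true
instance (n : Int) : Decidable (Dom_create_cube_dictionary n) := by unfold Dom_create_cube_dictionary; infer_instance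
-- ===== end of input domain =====

-- B replaces A's per-candidate trial division by all integers up to sqrt with trial
-- division by the stored primes only (objective: faster, measured ~3x at n=200000).

-- ===== PORT A =====
-- int(num ** 0.5) is ported as Nat.sqrt: exact on |num| ≤ 2^31, where the float
-- error of num ** 0.5 is far smaller than the distance to the nearest integer boundary.
def pv_is_prime (num : Int) : Bool :=
  if num < 2 then false
  else
    (PySem.List.pyRange 2 ((Nat.sqrt num.toNat : Int) + 1) 1).all
      (fun i => !(PySem.Int.mod num i == 0))

def create_cube_dictionary (n : Int) : (List (Int × Int)) × Int :=
  let st := (PySem.List.pyRange 0 n 1).foldl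
    (fun (st : PySem.Dict Int Int × Int) num =>
      if pv_is_prime num then (st.1.insert num (num ^ 3), st.2 + 1) else st)
    (PySem.Dict.empty, 0)
  (st.1.items, st.2)

-- ===== PORT B =====
-- the inner 'for p in primes: … break' loop of Source B
def pv_check (num : Int) : List Int → Bool
  | [] => true
  | p :: ps =>
    if p * p > num then true
    else if PySem.Int.mod num p == 0 then false
    else pv_check num ps

def create_cube_dictionary_alt (n : Int) : (List (Int × Int)) × Int :=
  let st := (PySem.List.pyRange 2 n 1).foldl
    (fun (st : List Int × PySem.Dict Int Int) num =>
      if pv_check num st.1 then (st.1 ++ [num], st.2.insert num (num ^ 3)) else st)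
    ([], PySem.Dict.empty)
  (st.2.items, (st.1.length : Int))

-- ===== PRECONDITION & SPEC =====
def Spec_create_cube_dictionary (n : Int) (out : (List (Int × Int)) × Int) : Prop := out = create_cube_dictionary_alt n
instance (n : Int) (out : (List (Int × Int)) × Int) : Decidable (Spec_create_cube_dictionary n out) := by unfold Spec_create_cube_dictionary; infer_instance

-- ===== CLAIM (what is proved, stated in full; the proofs are below) =====
def Claim_equal_create_cube_dictionary : Prop := ∀ (n : Int), Dom_create_cube_dictionary n → Spec_create_cube_dictionary n (create_cube_dictionary n)

-- ===== LEMMAS AND PROOFS =====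

-- primes below k, the canonical reference list
def primesU (k : Nat) : List Nat := (List.range k).filter (fun m => decide (Nat.Prime m))
def pitems (k : Nat) : List (Int × Int) := (primesU k).map (fun p : Nat => ((p : Int), (p : Int) ^ 3))
def pints (k : Nat) : List Int := (primesU k).map (fun p : Nat => (p : Int))

lemma primesU_succ (k : Nat) :
    primesU (k + 1) = primesU k ++ if Nat.Prime k then [k] else [] := by
  unfold primesU
  rw [List.range_succ, List.filter_append]
  by_cases hp : Nat.Prime k <;> simp [hp]

lemma mem_primesU {k p : Nat} : p ∈ primesU k ↔ p < k ∧ Nat.Prime p := by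
  unfold primesU; simp [List.mem_filter]

lemma mem_pints {k : Nat} {x : Int} : x ∈ pints k ↔ ∃ p : Nat, p < k ∧ Nat.Prime p ∧ x = (p : Int) := by
  unfold pints
  rw [List.mem_map]
  constructor
  · rintro ⟨p, hp, rfl⟩
    exact ⟨p, (mem_primesU.mp hp).1, (mem_primesU.mp hp).2, rfl⟩
  · rintro ⟨p, h1, h2, rfl⟩
    exact ⟨p, mem_primesU.mpr ⟨h1, h2⟩, rfl⟩

lemma pints_sorted (k : Nat) : (pints k).Pairwise (· ≤ ·) := by
  have h : (primesU k).Pairwise (· < ·) := (List.pairwise_lt_range (n := k)).filter _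
  unfold pints
  exact List.Pairwise.map _ (fun a b hab => by exact_mod_cast Nat.le_of_lt hab) h

-- A's is_prime computes Nat primality
lemma pv_is_prime_eq (m : Nat) : pv_is_prime (m : Int) = decide (Nat.Prime m) := by
  unfold pv_is_prime
  by_cases h2 : m < 2
  · have : ¬ Nat.Prime m := by
      intro hp; exact absurd hp.two_le (by omega)
    simp [this, show (m : Int) < 2 by exact_mod_cast h2]
  · have hm2 : (2 : Nat) ≤ m := by omega
    have hnotlt : ¬ ((m : Int) < 2) := by exact_mod_cast h2
    simp only [hnotlt, if_false]
    rw [Bool.eq_iff_iff, List.all_eq_true, decide_eq_true_iff]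
    simp only [Int.toNat_natCast]
    constructor
    · intro h
      rw [Nat.prime_def_le_sqrt]
      refine ⟨hm2, fun q hq hqs hdvd => ?_⟩
      have hmem : (q : Int) ∈ PySem.List.pyRange 2 ((Nat.sqrt m : Int) + 1) 1 := by
        rw [PySem.List.mem_pyRange_one]
        constructor
        · exact_mod_cast hq
        · have : (q : Int) ≤ (Nat.sqrt m : Int) := by exact_mod_cast hqs
          omega
      have := h _ hmem
      simp only [Bool.not_eq_eq_eq_not, Bool.not_true, beq_eq_false_iff_ne] at this
      apply this
      rw [PySem.Int.mod_eq_emod_of_pos (by exact_mod_cast (by omega : 0 < q))]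
      exact Int.emod_eq_zero_of_dvd (by exact_mod_cast hdvd)
    · intro hp i hi
      rw [PySem.List.mem_pyRange_one] at hi
      obtain ⟨hi1, hi2⟩ := hi
      simp only [Bool.not_eq_eq_eq_not, Bool.not_true, beq_eq_false_iff_ne]
      intro hmod
      rw [PySem.Int.mod_eq_emod_of_pos (by omega)] at hmod
      have hdvd : i ∣ (m : Int) := Int.dvd_of_emod_eq_zero hmod
      set q : Nat := i.toNat with hq
      have hiq : i = (q : Int) := by omega
      rw [hiq] at hdvd
      have hqd : q ∣ m := by exact_mod_cast hdvd
      have hq2 : 2 ≤ q := by omega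
      have hqs : q ≤ Nat.sqrt m := by omega
      exact (Nat.prime_def_le_sqrt.mp hp).2 q hq2 hqs hqd

-- pv_check on an ≤-sorted list of values ≥ 2: true iff no listed p with p*p ≤ num divides num
lemma pv_check_true_iff (num : Int) (L : List Int)
    (hsort : L.Pairwise (· ≤ ·)) (hpos : ∀ p ∈ L, 2 ≤ p) :
    pv_check num L = true ↔ ∀ p ∈ L, p * p ≤ num → PySem.Int.mod num p ≠ 0 := by
  induction L with
  | nil => simp [pv_check]
  | cons p ps ih =>
    rw [List.pairwise_cons] at hsort
    obtain ⟨hple, hps⟩ := hsort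
    have hp2 : 2 ≤ p := hpos p (by simp)
    by_cases hbig : p * p > num
    · simp only [pv_check, if_pos hbig]
      constructor
      · intro _ q hq hqle
        exfalso
        rcases List.mem_cons.mp hq with rfl | hq
        · exact absurd hqle (not_le.mpr hbig)
        · have hpq : p ≤ q := hple q hq
          nlinarith
      · intro _; trivial
    · simp only [pv_check, if_neg hbig]
      by_cases hmod : PySem.Int.mod num p == 0
      · simp only [if_pos hmod, Bool.false_eq_true, false_iff]
        intro h
        exact h p List.mem_cons_self (not_lt.mp hbig) (by simpa using hmod)
      · simp only [if_neg hmod]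
        rw [ih hps (fun q hq => hpos q (by simp [hq]))]
        constructor
        · intro h q hq hqle
          rcases List.mem_cons.mp hq with rfl | hq
          · simpa using hmod
          · exact h q hq hqle
        · intro h q hq hqle
          exact h q (List.mem_cons_of_mem _ hq) hqle

-- with the full prime list below m, pv_check decides primality of m
lemma pv_check_eq (m : Nat) (hm : 2 ≤ m) :
    pv_check (m : Int) (pints m) = decide (Nat.Prime m) := by
  rw [Bool.eq_iff_iff, decide_eq_true_iff, pv_check_true_iff _ _ (pints_sorted m)
      (fun p hp => by
        obtain ⟨q, _, hq, rfl⟩ := mem_pints.mp hp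
        exact_mod_cast hq.two_le)]
  by_cases hp : Nat.Prime m
  · simp only [hp, iff_true]
    intro p hpmem hple hmod
    obtain ⟨q, hqlt, hq, rfl⟩ := mem_pints.mp hpmem
    rw [PySem.Int.mod_eq_emod_of_pos (by exact_mod_cast hq.pos)] at hmod
    have hdvd : q ∣ m := by exact_mod_cast Int.dvd_of_emod_eq_zero hmod
    rcases (Nat.Prime.eq_one_or_self_of_dvd hp q hdvd) with h | h
    · exact absurd h (by have := hq.two_le; omega)
    · omega
  · simp only [hp, iff_false]
    intro h
    have hm0 : 0 < m := by omega
    have hm1 : m ≠ 1 := by omega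
    set q := m.minFac with hqdef
    have hqp : Nat.Prime q := Nat.minFac_prime hm1
    have hqd : q ∣ m := Nat.minFac_dvd m
    have hqs : q * q ≤ m := by
      have := Nat.minFac_sq_le_self hm0 hp
      rwa [pow_two] at this
    have hqlt : q < m := by nlinarith [hqp.two_le]
    have hmem : (q : Int) ∈ pints m := mem_pints.mpr ⟨q, hqlt, hqp, rfl⟩
    refine h (q : Int) hmem (by exact_mod_cast hqs) ?_
    rw [PySem.Int.mod_eq_emod_of_pos (by exact_mod_cast hqp.pos)]
    exact Int.emod_eq_zero_of_dvd (by exact_mod_cast hqd)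

-- the dict key about to be inserted is fresh
lemma not_contains_pitems (k : Nat) :
    (PySem.Dict.mk (pitems k)).contains (k : Int) = false := by
  rw [PySem.Dict.contains_eq_decide_mem_keys]
  simp only [decide_eq_false_iff_not]
  intro hmem
  rw [PySem.Dict.keys_mk] at hmem
  unfold pitems at hmem
  simp only [List.map_map, List.mem_map] at hmem
  obtain ⟨p, hp, hpk⟩ := hmem
  have h1 : p < k := (mem_primesU.mp hp).1
  have h2 : (p : Int) = (k : Int) := by simpa using hpk
  omega

-- the joint loop invariant for both folds, after processing numbers below k
lemma main_inv (k : Nat) :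
    ((PySem.List.pyRange 0 (k : Int) 1).foldl
      (fun (st : PySem.Dict Int Int × Int) num =>
        if pv_is_prime num then (st.1.insert num (num ^ 3), st.2 + 1) else st)
      (PySem.Dict.empty, 0)
      = (PySem.Dict.mk (pitems k), ((primesU k).length : Int))) ∧
    ((PySem.List.pyRange 2 (k : Int) 1).foldl
      (fun (st : List Int × PySem.Dict Int Int) num =>
        if pv_check num st.1 then (st.1 ++ [num], st.2.insert num (num ^ 3)) else st)
      ([], PySem.Dict.empty)
      = (pints k, PySem.Dict.mk (pitems k))) := by
  induction k with
  | zero => constructor <;> decide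
  | succ k ih =>
    obtain ⟨ihA, ihB⟩ := ih
    have hrangeA : PySem.List.pyRange 0 ((k : Int) + 1) 1
        = PySem.List.pyRange 0 (k : Int) 1 ++ [(k : Int)] :=
      PySem.List.pyRange_one_succ_right (by omega)
    by_cases hk2 : 2 ≤ k
    · have hrangeB : PySem.List.pyRange 2 ((k : Int) + 1) 1
          = PySem.List.pyRange 2 (k : Int) 1 ++ [(k : Int)] :=
        PySem.List.pyRange_one_succ_right (by exact_mod_cast hk2)
      have hchk : pv_check (k : Int) (pints k) = decide (Nat.Prime k) := pv_check_eq k hk2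
      have hpr : pv_is_prime (k : Int) = decide (Nat.Prime k) := pv_is_prime_eq k
      have hfresh := not_contains_pitems k
      by_cases hp : Nat.Prime k
      · have hins : (PySem.Dict.mk (pitems k)).insert (k : Int) ((k : Int) ^ 3)
            = PySem.Dict.mk (pitems (k + 1)) := by
          have h1 := PySem.Dict.items_insert_of_not_contains
            (d := PySem.Dict.mk (pitems k)) (k := (k : Int)) (v := ((k : Int) ^ 3)) hfresh
          have h2 : pitems (k + 1) = pitems k ++ [((k : Int), (k : Int) ^ 3)] := by
            unfold pitems; rw [primesU_succ, if_pos hp]; simp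
          cases hd : (PySem.Dict.mk (pitems k)).insert (k : Int) ((k : Int) ^ 3) with
          | mk l =>
            congr 1
            have : l = ((PySem.Dict.mk (pitems k)).insert (k : Int) ((k : Int) ^ 3)).items := by
              rw [hd]
            rw [this, h1, h2]
        constructor
        · push_cast
          rw [hrangeA, List.foldl_append, ihA]
          simp only [List.foldl_cons, List.foldl_nil, hpr, hp, decide_true, if_true]
          rw [hins]
          have : primesU (k + 1) = primesU k ++ [k] := by rw [primesU_succ, if_pos hp]
          rw [this]
          simp
        · push_cast
          rw [hrangeB, List.foldl_append, ihB]
          simp only [List.foldl_cons, List.foldl_nil, hchk, hp, decide_true, if_true]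
          rw [hins]
          have : pints (k + 1) = pints k ++ [(k : Int)] := by
            unfold pints; rw [primesU_succ, if_pos hp]; simp
          rw [this]
      · have hsameP : primesU (k + 1) = primesU k := by
          rw [primesU_succ, if_neg hp]; simp
        have hsameI : pitems (k + 1) = pitems k := by unfold pitems; rw [hsameP]
        have hsameN : pints (k + 1) = pints k := by unfold pints; rw [hsameP]
        constructor
        · push_cast
          rw [hrangeA, List.foldl_append, ihA]
          simp [hpr, hp, hsameP, hsameI]
        · push_cast
          rw [hrangeB, List.foldl_append, ihB]
          simp [hchk, hp, hsameN, hsameI]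
    · -- k = 0 or 1: neither side changes (0 and 1 are not prime; B's range is still empty)
      interval_cases k <;> (constructor <;> decide)

-- ===== VERDICT (by name: the statement is the Claim_ definition above) =====
theorem create_cube_dictionary_spec : Claim_equal_create_cube_dictionary := by
  intro n _
  unfold Spec_create_cube_dictionary create_cube_dictionary create_cube_dictionary_alt
  by_cases hn : 0 ≤ n
  · have hk : n = ((n.toNat : Nat) : Int) := by omega
    rw [hk]
    obtain ⟨hA, hB⟩ := main_inv n.toNat
    rw [hA, hB]
    simp [pints]
  · rw [PySem.List.pyRange_one_eq_nil (by omega), PySem.List.pyRange_one_eq_nil (by omega)]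
    rfl
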